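-- pv_equiv track=rewrite | github.com/shady236/HackerRank-Solutions | Algorithms/XOR Matrix/XOR Matrix.py | xorMatrix
-- ===== SOURCE A (Python) =====
-- def xorMatrix(m, first_row):
--     m = m - 1
--     for j in range(63, -1, -1):
--         if((m>>j) & 1 == 1):
--             intialRow = first_row.copy()
--
--             for i in range(0, len(first_row)):
--                 first_row[i] ^= intialRow[(i + (1<<j)) % len(first_row)];
--     return first_row
-- ===== SOURCE B (Python) =====
-- def xorMatrix(m, first_row):
--     # Polynomial method: the row after m-1 steps is p(S)·row where
--     # p(x) = (1+x)^(m-1) in GF(2)[x]/(x^n - 1) and S is the cyclic shift.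
--     # Compute p's coefficient (parity) vector by MSB-first square-and-multiply
--     # (squaring over GF(2) is the Frobenius map r -> 2r mod n), then apply it
--     # to the row in a single gather pass.  Mutates first_row in place like A.
--     n = len(first_row)
--     if n == 0:
--         return first_row
--     K = m - 1
--     c = [False] * n
--     c[0] = True
--     for j in range(K.bit_length() - 1, -1, -1):
--         sq = [False] * n
--         for r in range(n):
--             if c[r]:
--                 sq[2 * r % n] = not sq[2 * r % n]
--         c = sq
--         if (K >> j) & 1:
--             c = [c[r] ^ c[(r - 1) % n] for r in range(n)]
--     res = [0] * n
--     for i in range(n):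
--         v = 0
--         for r in range(n):
--             if c[r]:
--                 v ^= first_row[(i + r) % n]
--         res[i] = v
--     first_row[:] = res
--     return first_row
-- ===== Notes on version B (the rewrite author's own statement) =====
-- stated objective: alternative
-- what changed: Instead of A's binary lifting on the row (64 passes, each XORing the row with its 2^j-rotation for set bits of m-1), B works in the polynomial ring GF(2)[x]/(x^n-1): it computes the coefficient parity vector of (1+x)^(m-1) by MSB-first square-and-multiply, where squaring is the Frobenius index-doubling map r -> 2r mod n and multiply is by the sparse factor 1+x, and then applies that vector to the row in one final gather pass (a different algorithm of higher worst-case cost: it trades speed for the explicit operator representation); …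
-- outside the precondition, e.g. on xorMatrix(0, [1, 2, 3]): A returns [1, 2, 3], B returns [3, 1, 2]; on xorMatrix(-5, [1, 2, 3]): A returns [3, 1, 2], B returns [2, 3, 1]
import Mathlib
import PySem

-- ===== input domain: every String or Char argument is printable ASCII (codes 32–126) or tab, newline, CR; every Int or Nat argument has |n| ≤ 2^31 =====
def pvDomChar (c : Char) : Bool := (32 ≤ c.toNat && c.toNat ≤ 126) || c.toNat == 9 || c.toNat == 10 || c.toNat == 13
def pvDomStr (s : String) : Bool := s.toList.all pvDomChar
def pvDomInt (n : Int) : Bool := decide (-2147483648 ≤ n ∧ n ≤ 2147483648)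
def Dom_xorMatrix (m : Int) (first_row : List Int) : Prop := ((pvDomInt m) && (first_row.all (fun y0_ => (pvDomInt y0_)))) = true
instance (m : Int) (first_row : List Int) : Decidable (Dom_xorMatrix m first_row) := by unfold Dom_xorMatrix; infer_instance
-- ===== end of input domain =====

-- B replaces A's binary lifting on the row (64 passes XORing the row with its 2^j-rotation) by
-- the polynomial method: it builds the coefficient parity vector of (1+x)^(m-1) in
-- GF(2)[x]/(x^n - 1) by MSB-first square-and-multiply (squaring = Frobenius index doubling
-- r -> 2r mod n) and applies it to the row in one final gather pass. Equivalence is about the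
-- RETURN value only: Python A and B both also mutate first_row in place.

-- ===== PORT A =====
-- Literal port of A. Python's in-place `first_row[i] ^= intialRow[...]` reads first_row[i]
-- before index i is ever written and reads the pre-step copy `intialRow` (= row at the start of
-- the pass) on the right, so one pass of the inner loop is the elementwise map below. `j` ranges
-- over [63..0], so `j.toNat` is exact for Python's `m >> j` and `1 << j`.
def xorMatrix (m : Int) (first_row : List Int) : List Int :=
  let mk := m - 1
  (PySem.List.pyRange 63 (-1) (-1)).foldl
    (fun row j =>
      if PySem.Int.band (mk >>> j.toNat) 1 == 1 then
        (List.range row.length).map (fun (i : Nat) =>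
          PySem.Int.bxor (PySem.List.pyGetD row (i : Int) 0)
            (PySem.List.pyGetD row
              (PySem.Int.mod ((i : Int) + ((1 : Int) <<< j.toNat)) (PySem.List.len row)) 0))
      else row)
    first_row

-- ===== PORT B =====
-- Transliteration of Source B. The inner loops of Source B become the helpers below, step for step:
-- `sq[2*r%n] = not sq[2*r%n]` toggles, `c[(r-1)%n]` is read as c[(r+(n-1))%n] (exact for
-- Python's `%` on 0 ≤ r < n), and the gather loop is a foldl accumulating XOR.
def bSquare (c : List Bool) : List Bool :=
  (List.range c.length).foldl
    (fun sq r =>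
      if c.getD r false then sq.set (2 * r % c.length) (!(sq.getD (2 * r % c.length) false))
      else sq)
    (List.replicate c.length false)

def bMul (c : List Bool) : List Bool :=
  (List.range c.length).map
    (fun r => xor (c.getD r false) (c.getD ((r + (c.length - 1)) % c.length) false))

def bBody (K : Int) (c : List Bool) (j : Int) : List Bool :=
  let c2 := bSquare c
  if PySem.Int.band (K >>> j.toNat) 1 == 1 then bMul c2 else c2

def bGather (c : List Bool) (row : List Int) (i : Nat) : Int :=
  (List.range c.length).foldl
    (fun v r => if c.getD r false then PySem.Int.bxor v (row.getD ((i + r) % row.length) 0) else v)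
    0

def bApply (c : List Bool) (row : List Int) : List Int :=
  (List.range row.length).map (fun i => bGather c row i)

def xorMatrix_alt (m : Int) (first_row : List Int) : List Int :=
  if first_row.length = 0 then first_row
  else
    let K := m - 1
    let c := (PySem.List.pyRange ((PySem.Int.bitLength K : Int) - 1) (-1) (-1)).foldl
      (bBody K) ((List.replicate first_row.length false).set 0 true)
    bApply c first_row

-- ===== PRECONDITION & SPEC =====
-- Pre_ restricts to the problem's natural domain m ≥ 1 (m counts matrix rows): for m ≤ 0 on a
-- nonempty row A reads m-1 through its lowest 64 two's-complement bits while B uses the bit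
-- length of m-1 — two accidental behaviours that disagree; empty rows agree for every m and
-- stay admitted.
def Pre_xorMatrix (m : Int) (first_row : List Int) : Prop := 1 ≤ m ∨ first_row = []
instance (m : Int) (first_row : List Int) : Decidable (Pre_xorMatrix m first_row) := by
  unfold Pre_xorMatrix; infer_instance

def pvWitness_xorMatrix : Int × List Int := (3, [1, 2, 3])

def Spec_xorMatrix (m : Int) (first_row : List Int) (out : List Int) : Prop := out = xorMatrix_alt m first_row
instance (m : Int) (first_row : List Int) (out : List Int) : Decidable (Spec_xorMatrix m first_row out) := by unfold Spec_xorMatrix; infer_instance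

-- ===== CLAIM (what is proved, stated in full; the proofs are below) =====
def Claim_equal_xorMatrix : Prop := ∀ (m : Int) (first_row : List Int), Dom_xorMatrix m first_row → Pre_xorMatrix m first_row → Spec_xorMatrix m first_row (xorMatrix m first_row)

-- ===== LEMMAS AND PROOFS =====

-- Sign/magnitude encoding of Int under which PySem.Int.bxor is componentwise (Bool.xor, Nat.xor).
def pvEnc (x : Int) : Bool × Nat := if 0 ≤ x then (false, x.toNat) else (true, (-x - 1).toNat)

theorem pvEnc_injective (x y : Int) (h : pvEnc x = pvEnc y) : x = y := by
  unfold pvEnc at h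
  split_ifs at h <;> simp_all <;> omega

theorem pvEnc_bxor (a b : Int) :
    pvEnc (PySem.Int.bxor a b) = ((pvEnc a).1 ^^ (pvEnc b).1, (pvEnc a).2 ^^^ (pvEnc b).2) := by
  unfold pvEnc PySem.Int.bxor
  split_ifs <;> simp <;> omega

theorem pvbxor_assoc (a b c : Int) :
    PySem.Int.bxor (PySem.Int.bxor a b) c = PySem.Int.bxor a (PySem.Int.bxor b c) := by
  apply pvEnc_injective
  simp only [pvEnc_bxor, Prod.mk.injEq]
  exact ⟨Bool.xor_assoc _ _ _, Nat.xor_assoc _ _ _⟩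

theorem pvbxor_zero_left (a : Int) : PySem.Int.bxor 0 a = a := by
  rw [PySem.Int.bxor_comm, PySem.Int.bxor_zero]

theorem pvbxor_cancel_left (a b : Int) : PySem.Int.bxor a (PySem.Int.bxor a b) = b := by
  rw [← pvbxor_assoc, PySem.Int.bxor_self, pvbxor_zero_left]

theorem pvbxor_left_comm (a b c : Int) :
    PySem.Int.bxor a (PySem.Int.bxor b c) = PySem.Int.bxor b (PySem.Int.bxor a c) := by
  rw [← pvbxor_assoc, PySem.Int.bxor_comm a b, pvbxor_assoc]

theorem bxor_cancel_mid (a b c : Int) :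
    PySem.Int.bxor (PySem.Int.bxor a b) (PySem.Int.bxor b c) = PySem.Int.bxor a c := by
  rw [pvbxor_assoc, pvbxor_cancel_left]

-- One XOR pass with shift s (the shape of A's inner loop and of B's one-step operator).
def pvStep (s : Nat) (row : List Int) : List Int :=
  (List.range row.length).map (fun i =>
    PySem.Int.bxor (row.getD i 0) (row.getD ((i + s) % row.length) 0))

theorem length_pvStep (s : Nat) (row : List Int) : (pvStep s row).length = row.length := by
  simp [pvStep]

theorem getD_pvStep (s : Nat) (row : List Int) (i : Nat) (h : i < row.length) :
    (pvStep s row).getD i 0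
      = PySem.Int.bxor (row.getD i 0) (row.getD ((i + s) % row.length) 0) := by
  simp [pvStep, List.getD, h]

theorem getElem_pvStep (s : Nat) (row : List Int) (i : Nat) (h : i < (pvStep s row).length) :
    (pvStep s row)[i]
      = PySem.Int.bxor (row.getD i 0) (row.getD ((i + s) % row.length) 0) := by
  have hi : i < row.length := by rwa [length_pvStep] at h
  simp [pvStep, hi]

theorem pvStep_pvStep (s : Nat) (row : List Int) : pvStep s (pvStep s row) = pvStep (s + s) row := by
  apply List.ext_getElem (by simp [length_pvStep])
  intro i h1 h2
  have hi : i < row.length := by rwa [length_pvStep, length_pvStep] at h1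
  have hpos : 0 < row.length := by omega
  have hm : (i + s) % row.length < row.length := Nat.mod_lt _ hpos
  rw [getElem_pvStep _ _ _ h1, getElem_pvStep _ _ _ h2, length_pvStep,
    getD_pvStep s row i hi, getD_pvStep s row _ hm, Nat.mod_add_mod,
    bxor_cancel_mid, ← Nat.add_assoc]

theorem pvIter_two_pow (t : Nat) : ∀ row : List Int, (pvStep 1)^[2 ^ t] row = pvStep (2 ^ t) row := by
  induction t with
  | zero => intro row; simp
  | succ t ih =>
      intro row
      have h2 : 2 ^ (t + 1) = 2 ^ t + 2 ^ t := by rw [pow_succ]; omega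
      rw [h2, Function.iterate_add_apply, ih, ih, pvStep_pvStep]

-- The shared bit test: Python's `(k >> j) & 1 == 1` for a nonnegative k.
theorem pvBit_test (k J : Nat) :
    (PySem.Int.band (((k : Nat) : Int) >>> ((J : Nat) : Int)) 1 == 1)
      = decide (k / 2 ^ J % 2 = 1) := by
  rw [Int.shiftRight_natCast_right, ← Int.natCast_shiftRight]
  have h1 : (1 : Int) = ((1 : Nat) : Int) := rfl
  rw [h1, PySem.Int.band_natCast, Nat.and_one_is_mod, Nat.shiftRight_eq_div_pow]
  rcases Nat.mod_two_eq_zero_or_one (k / 2 ^ J) with h | h <;> simp [h]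

theorem pvBit_test' (k J : Nat) :
    (PySem.Int.band ((k : Int) >>> J) 1 == 1) = decide (k / 2 ^ J % 2 = 1) := by
  rw [← Int.natCast_shiftRight]
  have h1 : (1 : Int) = ((1 : Nat) : Int) := rfl
  rw [h1, PySem.Int.band_natCast, Nat.and_one_is_mod, Nat.shiftRight_eq_div_pow]
  rcases Nat.mod_two_eq_zero_or_one (k / 2 ^ J) with h | h <;> simp [h]

-- Canonical form of A's guarded loop body for a nonnegative exponent k.
def pvBody (k : Nat) (row : List Int) (j : Int) : List Int :=
  if k / 2 ^ j.toNat % 2 = 1 then pvStep (2 ^ j.toNat) row else row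

theorem bodyA_eq_pvBody (k : Nat) (row : List Int) (j : Int) :
    (if PySem.Int.band (((k : Nat) : Int) >>> ((j.toNat : Nat) : Int)) 1 == 1 then
        (List.range row.length).map (fun (i : Nat) =>
          PySem.Int.bxor (PySem.List.pyGetD row (i : Int) 0)
            (PySem.List.pyGetD row
              (PySem.Int.mod ((i : Int) + ((1 : Int) <<< ((j.toNat : Nat) : Int))) (PySem.List.len row)) 0))
      else row)
      = pvBody k row j := by
  unfold pvBody
  rw [pvBit_test k j.toNat]
  by_cases hbit : k / 2 ^ j.toNat % 2 = 1
  · simp only [hbit, decide_true, if_true]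
    unfold pvStep
    apply List.map_congr_left
    intro i hi
    have hilt : i < row.length := List.mem_range.mp hi
    have hsh : (1 : Int) <<< ((j.toNat : Nat) : Int) = ((2 ^ j.toNat : Nat) : Int) := by
      rw [Int.shiftLeft_natCast_right, Int.shiftLeft_eq']; push_cast; ring
    rw [hsh]
    have hadd : (i : Int) + ((2 ^ j.toNat : Nat) : Int) = ((i + 2 ^ j.toNat : Nat) : Int) := by
      push_cast; ring
    rw [hadd]
    have hlen : PySem.List.len row = ((row.length : Nat) : Int) := PySem.List.len_eq row
    rw [hlen, PySem.Int.mod_natCast]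
    simp only [PySem.List.pyGetD_natCast]
  · simp [hbit]

-- A's bit loop over j = J-1 … 0 applies the shift-1 step k % 2^J times.
theorem pvBody_loop (k : Nat) : ∀ (J : Nat) (row : List Int),
    (PySem.List.pyRange ((J : Int) - 1) (-1) (-1)).foldl (pvBody k) row
      = (pvStep 1)^[k % 2 ^ J] row := by
  intro J
  induction J with
  | zero =>
      intro row
      rw [PySem.List.pyRange_neg_one_eq_nil (by norm_num)]
      simp [Nat.mod_one]
  | succ J ih =>
      intro row
      have hJ : ((J + 1 : Nat) : Int) - 1 = (J : Int) := by push_cast; ring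
      rw [hJ, PySem.List.pyRange_neg_one_cons (by omega), List.foldl_cons, ih]
      have hJt : ((J : Int)).toNat = J := Int.toNat_natCast J
      unfold pvBody
      rw [hJt]
      have hmod : k % 2 ^ (J + 1) = k % 2 ^ J + 2 ^ J * (k / 2 ^ J % 2) := Nat.mod_pow_succ
      by_cases hbit : k / 2 ^ J % 2 = 1
      · rw [if_pos hbit, ← pvIter_two_pow, ← Function.iterate_add_apply, hmod, hbit, Nat.mul_one]
      · rw [if_neg hbit]
        have h0 : k / 2 ^ J % 2 = 0 := by omega
        rw [hmod, h0]
        simp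

theorem A_char (m : Int) (row : List Int) (hm : 1 ≤ m) (hub : m ≤ 2147483648) :
    xorMatrix m row = (pvStep 1)^[(m - 1).toNat] row := by
  simp only [xorMatrix]
  have hk : m - 1 = (((m - 1).toNat : Nat) : Int) := by omega
  rw [hk]
  rw [PySem.List.foldl_congr_mem _ _ (pvBody (m - 1).toNat) _ (fun acc j _ =>
    bodyA_eq_pvBody (m - 1).toNat acc j)]
  have h63 : (63 : Int) = ((64 : Nat) : Int) - 1 := by norm_num
  rw [h63, pvBody_loop ((m - 1).toNat) 64 row]
  have hlt : (m - 1).toNat % 2 ^ 64 = (m - 1).toNat := Nat.mod_eq_of_lt (by omega)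
  rw [hlt, Int.toNat_natCast]

-- ---- XOR-sum machinery for B ----

def xlist (l : List Int) : Int := l.foldl PySem.Int.bxor 0

theorem foldl_bxor_start (l : List Int) : ∀ s : Int, l.foldl PySem.Int.bxor s = PySem.Int.bxor s (xlist l) := by
  induction l with
  | nil => intro s; simp [xlist, PySem.Int.bxor_zero]
  | cons x l ih =>
      intro s
      simp only [xlist, List.foldl_cons] at *
      rw [ih, ih (PySem.Int.bxor 0 x), pvbxor_zero_left, ← pvbxor_assoc]

theorem xlist_cons (x : Int) (l : List Int) : xlist (x :: l) = PySem.Int.bxor x (xlist l) := by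
  simp only [xlist, List.foldl_cons, pvbxor_zero_left]
  exact foldl_bxor_start l x

theorem xlist_append (a b : List Int) : xlist (a ++ b) = PySem.Int.bxor (xlist a) (xlist b) := by
  simp only [xlist, List.foldl_append]
  rw [foldl_bxor_start b (List.foldl PySem.Int.bxor 0 a)]
  rfl

theorem length_pvStep_iter (t : Nat) (row : List Int) :
    ((pvStep 1)^[t] row).length = row.length := by
  induction t generalizing row with
  | zero => rfl
  | succ t ih => rw [Function.iterate_succ_apply, ih, length_pvStep]

theorem xlist_map_bxor {α : Type} (l : List α) (g h : α → Int) :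
    xlist (l.map (fun a => PySem.Int.bxor (g a) (h a)))
      = PySem.Int.bxor (xlist (l.map g)) (xlist (l.map h)) := by
  induction l with
  | nil => simp [xlist]
  | cons a l ih =>
      simp only [List.map_cons, xlist_cons, ih]
      rw [pvbxor_assoc, pvbxor_assoc]
      congr 1
      rw [pvbxor_left_comm]

theorem xlist_perm (l l' : List Int) (h : l.Perm l') : xlist l = xlist l' := by
  induction h with
  | nil => rfl
  | cons x _ ih => rw [xlist_cons, xlist_cons, ih]
  | swap x y l => rw [xlist_cons, xlist_cons, xlist_cons, xlist_cons, pvbxor_left_comm]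
  | trans _ _ ih1 ih2 => rw [ih1, ih2]

theorem xlist_map_ite_filter {α : Type} (l : List α) (p : α → Bool) (f : α → Int) :
    xlist (l.map (fun a => if p a then f a else 0)) = xlist ((l.filter p).map f) := by
  induction l with
  | nil => rfl
  | cons a l ih =>
      cases hpa : p a
      · have hf : List.filter p (a :: l) = List.filter p l :=
          List.filter_cons_of_neg (by simp [hpa])
        rw [List.map_cons, hf, xlist_cons]
        simp only [hpa, Bool.false_eq_true, if_false]
        rw [pvbxor_zero_left, ih]
      · have hf : List.filter p (a :: l) = a :: List.filter p l := List.filter_cons_of_pos hpa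
        rw [List.map_cons, hf, List.map_cons, xlist_cons, xlist_cons, ih]
        simp only [hpa, if_true]

theorem foldl_if_bxor {α : Type} (l : List α) (p : α → Bool) (f : α → Int) :
    ∀ s : Int, l.foldl (fun v a => if p a then PySem.Int.bxor v (f a) else v) s
      = PySem.Int.bxor s (xlist (l.map (fun a => if p a then f a else 0))) := by
  induction l with
  | nil => intro s; simp [xlist, PySem.Int.bxor_zero]
  | cons a l ih =>
      intro s
      simp only [List.foldl_cons, List.map_cons]
      cases hpa : p a
      · simp only [Bool.false_eq_true, if_false]
        rw [ih, xlist_cons, pvbxor_zero_left]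
      · simp only [if_true]
        rw [ih, xlist_cons, pvbxor_assoc]

theorem xlist_const_zero {α : Type} (l : List α) : xlist (l.map (fun _ => (0 : Int))) = 0 := by
  induction l with
  | nil => rfl
  | cons a l ih => rw [List.map_cons, xlist_cons, ih, PySem.Int.bxor_zero]

-- The XOR-sum gI c row i = ⨁_{r < |c|, c[r]} row[(i+r) mod |row|]; bGather computes it.
def gI (c : List Bool) (row : List Int) (i : Nat) : Int :=
  xlist ((List.range c.length).map
    (fun r => if c.getD r false then row.getD ((i + r) % row.length) 0 else 0))

theorem bGather_eq_gI (c : List Bool) (row : List Int) (i : Nat) : bGather c row i = gI c row i := by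
  unfold bGather gI
  rw [foldl_if_bxor, pvbxor_zero_left]

theorem pvbxor_update_alg (A B X Y : Int) :
    PySem.Int.bxor A (PySem.Int.bxor B (PySem.Int.bxor X (PySem.Int.bxor B Y)))
      = PySem.Int.bxor X (PySem.Int.bxor A Y) := by
  rw [pvbxor_left_comm B X, pvbxor_cancel_left, pvbxor_left_comm A X]

-- Changing a map over range n at exactly one position t changes the XOR-sum by the two values.
theorem xlist_range_update (n t : Nat) (F F' : Nat → Int) (ht : t < n)
    (h : ∀ r, r ≠ t → F' r = F r) :
    xlist ((List.range n).map F')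
      = PySem.Int.bxor (F' t) (PySem.Int.bxor (F t) (xlist ((List.range n).map F))) := by
  have hn : n = t + (n - t - 1 + 1) := by omega
  have split : ∀ G : Nat → Int, (List.range n).map G
      = (List.range t).map G ++ (G t :: ((List.range (n - t - 1)).map (fun x => G (t + (x + 1))))) := by
    intro G
    conv_lhs => rw [hn, List.range_add]
    rw [List.range_succ_eq_map]
    simp [List.map_map, Function.comp]
  rw [split F', split F]
  have h1 : (List.range t).map F' = (List.range t).map F :=
    List.map_congr_left (fun r hr => h r (by have := List.mem_range.mp hr; omega))
  have h2 : (List.range (n - t - 1)).map (fun x => F' (t + (x + 1)))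
      = (List.range (n - t - 1)).map (fun x => F (t + (x + 1))) :=
    List.map_congr_left (fun r _ => h _ (by omega))
  rw [h1, h2, xlist_append, xlist_append, xlist_cons, xlist_cons]
  exact (pvbxor_update_alg (F' t) (F t) (xlist ((List.range t).map F))
    (xlist ((List.range (n - t - 1)).map (fun x => F (t + (x + 1)))))).symm

theorem gI_toggle (c : List Bool) (row : List Int) (i t : Nat) (ht : t < c.length) :
    gI (c.set t (!(c.getD t false))) row i
      = PySem.Int.bxor (row.getD ((i + t) % row.length) 0) (gI c row i) := by
  unfold gI
  rw [List.length_set]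
  have hupd := xlist_range_update c.length t
      (fun r => if c.getD r false then row.getD ((i + r) % row.length) 0 else 0)
      (fun r => if (c.set t (!(c.getD t false))).getD r false
        then row.getD ((i + r) % row.length) 0 else 0)
      ht (fun r hr => by
        have hne : t ≠ r := by omega
        simp only [List.getD, List.getElem?_set_ne hne])
  rw [hupd]
  have hset : (c.set t (!(c.getD t false))).getD t false = !(c.getD t false) := by
    simp only [List.getD, List.getElem?_set_self ht, Option.getD_some]
  simp only [hset]
  cases hc : c.getD t false
  · simp only [Bool.not_false, if_true, Bool.false_eq_true, if_false]
    rw [pvbxor_zero_left]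
  · simp only [Bool.not_true, Bool.false_eq_true, if_false, if_true]
    rw [pvbxor_zero_left]

theorem gI_all_false (n : Nat) (row : List Int) (i : Nat) :
    gI (List.replicate n false) row i = 0 := by
  unfold gI
  have : ∀ r ∈ List.range (List.replicate n false).length,
      (if (List.replicate n false).getD r false then row.getD ((i + r) % row.length) 0 else 0) = (0:Int) := by
    intro r hr
    have hz : (List.replicate n false).getD r false = false := by
      simp only [List.getD, List.getElem?_replicate]
      split <;> rfl
    simp only [hz, Bool.false_eq_true, if_false]
  rw [List.map_congr_left this, xlist_const_zero]

theorem gI_mod (c : List Bool) (row : List Int) (i : Nat) :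
    gI c row (i % row.length) = gI c row i := by
  unfold gI
  congr 1
  apply List.map_congr_left
  intro r _
  rw [Nat.mod_add_mod]

-- lengths
theorem length_bSquare (c : List Bool) : (bSquare c).length = c.length := by
  unfold bSquare
  generalize List.range c.length = L
  have : ∀ (L : List Nat) (sq : List Bool), (L.foldl (fun sq r =>
      if c.getD r false then sq.set (2 * r % c.length) (!(sq.getD (2 * r % c.length) false))
      else sq) sq).length = sq.length := by
    intro L
    induction L with
    | nil => intro sq; rfl
    | cons r L ih =>
        intro sq
        simp only [List.foldl_cons]
        by_cases h : c.getD r false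
        · rw [h, if_pos rfl, ih, List.length_set]
        · rw [if_neg h]; exact ih sq
  rw [this, List.length_replicate]

theorem length_bMul (c : List Bool) : (bMul c).length = c.length := by
  simp [bMul]

theorem length_bApply (c : List Bool) (row : List Int) : (bApply c row).length = row.length := by
  simp [bApply]

theorem getD_bApply (c : List Bool) (row : List Int) (q : Nat) (hq : q < row.length) :
    (bApply c row).getD q 0 = bGather c row q := by
  unfold bApply
  exact PySem.List.getD_map_range _ _ _ _ hq

theorem getElem_bApply (c : List Bool) (row : List Int) (i : Nat)
    (h : i < (bApply c row).length) : (bApply c row)[i] = bGather c row i := by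
  unfold bApply at h ⊢
  rw [List.getElem_map, List.getElem_range]

-- The squared vector gathers the doubled offsets of the true positions of c.
theorem gI_bSquare (c : List Bool) (row : List Int) (i : Nat)
    (hrow : row.length = c.length) (h0 : 0 < c.length) :
    gI (bSquare c) row i
      = xlist ((((List.range c.length).filter (fun r => c.getD r false))).map
          (fun r => row.getD ((i + 2 * r) % row.length) 0)) := by
  have key : ∀ (L : List Nat) (sq : List Bool), sq.length = c.length →
      gI (L.foldl (fun sq r =>
        if c.getD r false then sq.set (2 * r % c.length) (!(sq.getD (2 * r % c.length) false))
        else sq) sq) row i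
      = PySem.Int.bxor
          (xlist (((L.filter (fun r => c.getD r false))).map
            (fun r => row.getD ((i + 2 * r) % row.length) 0)))
          (gI sq row i) := by
    intro L
    induction L with
    | nil => intro sq _; simp [xlist, pvbxor_zero_left]
    | cons r L ih =>
        intro sq hsq
        simp only [List.foldl_cons]
        by_cases h : c.getD r false
        · have hf : List.filter (fun r => c.getD r false) (r :: L)
              = r :: List.filter (fun r => c.getD r false) L := List.filter_cons_of_pos h
          rw [if_pos h, hf, List.map_cons, xlist_cons]
          have hidx : 2 * r % c.length < sq.length := by rw [hsq]; exact Nat.mod_lt _ h0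
          rw [ih _ (by rw [List.length_set, hsq])]
          rw [gI_toggle sq row i (2 * r % c.length) hidx]
          have harg : (i + 2 * r % c.length) % row.length = (i + 2 * r) % row.length := by
            rw [hrow, Nat.add_mod_mod]
          rw [harg, pvbxor_left_comm, ← pvbxor_assoc]
        · rw [if_neg h,
            List.filter_cons_of_neg (p := fun r => c.getD r false) (a := r) (l := L) h]
          exact ih sq hsq
  unfold bSquare
  rw [key _ _ (by rw [List.length_replicate]), gI_all_false, PySem.Int.bxor_zero]

-- Double XOR-sum over the same index list collapses to the diagonal (pairs cancel over GF(2)).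
theorem xlist_double (T : List Nat) (f : Nat → Nat → Int) (hsym : ∀ a b, f a b = f b a) :
    xlist (T.map (fun a => xlist (T.map (fun b => f a b))))
      = xlist (T.map (fun a => f a a)) := by
  induction T with
  | nil => rfl
  | cons a T ih =>
      simp only [List.map_cons, xlist_cons]
      have hhead : xlist (T.map (fun b => f a b)) = xlist (T.map (fun x => f x a)) := by
        congr 1
        exact List.map_congr_left (fun b _ => hsym a b)
      have hsplit : T.map (fun x => PySem.Int.bxor (f x a) (xlist (T.map (fun b => f x b))))
          = T.map (fun x => PySem.Int.bxor ((fun x => f x a) x)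
              ((fun x => xlist (T.map (fun b => f x b))) x)) := rfl
      rw [hsplit, xlist_map_bxor, ih, ← hhead]
      set S := xlist (T.map (fun b => f a b))
      set D := xlist (T.map (fun a => f a a))
      rw [pvbxor_assoc]
      congr 1
      exact pvbxor_cancel_left S D

-- gI in filtered form.
theorem gI_filter (c : List Bool) (row : List Int) (i : Nat) :
    gI c row i = xlist ((((List.range c.length).filter (fun r => c.getD r false))).map
      (fun r => row.getD ((i + r) % row.length) 0)) := by
  unfold gI
  exact xlist_map_ite_filter _ _ _

-- Applying the squared vector = applying the vector twice.
theorem bApply_bSquare (c : List Bool) (row : List Int)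
    (hrow : row.length = c.length) (h0 : 0 < c.length) :
    bApply (bSquare c) row = bApply c (bApply c row) := by
  apply List.ext_getElem (by simp [length_bApply])
  intro i h1 h2
  have hi : i < row.length := by rwa [length_bApply] at h1
  rw [getElem_bApply _ _ _ h1, getElem_bApply _ _ _ h2]
  rw [bGather_eq_gI, bGather_eq_gI]
  rw [gI_bSquare c row i hrow h0, gI_filter]
  set T := (List.range c.length).filter (fun r => c.getD r false) with hT
  have hmem : ∀ s ∈ T, (bApply c row).getD ((i + s) % (bApply c row).length) 0
      = xlist (T.map (fun r => row.getD ((i + s + r) % row.length) 0)) := by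
    intro s _
    rw [length_bApply]
    have hq : (i + s) % row.length < row.length := Nat.mod_lt _ (by omega)
    rw [getD_bApply c row _ hq, bGather_eq_gI, gI_mod, gI_filter, ← hT]
  rw [List.map_congr_left hmem]
  rw [xlist_double T (fun a b => row.getD ((i + a + b) % row.length) 0)
      (fun a b => by
        show row.getD ((i + a + b) % row.length) 0 = row.getD ((i + b + a) % row.length) 0
        have hab : i + a + b = i + b + a := by omega
        rw [hab])]
  congr 1
  exact List.map_congr_left (fun r _ => by
    have h2r : i + 2 * r = i + r + r := by omega
    rw [h2r])

-- splitting an if over xor into a bxor of two ifs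
theorem ite_xor_split (a b : Bool) (x : Int) :
    (if xor a b then x else 0) = PySem.Int.bxor (if a then x else 0) (if b then x else 0) := by
  cases a <;> cases b <;>
    simp [PySem.Int.bxor_zero, pvbxor_zero_left, PySem.Int.bxor_self]

-- Applying the (1+x)-multiplied vector = one shift-1 XOR pass after applying the vector.
theorem bApply_bMul (c : List Bool) (row : List Int)
    (hrow : row.length = c.length) (h0 : 0 < c.length) :
    bApply (bMul c) row = pvStep 1 (bApply c row) := by
  have hlen2 : (bApply c row).length = row.length := length_bApply c row
  apply List.ext_getElem (by simp [length_bApply, length_pvStep])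
  intro i h1 h2
  have hi : i < row.length := by rwa [length_bApply] at h1
  rw [getElem_bApply _ _ _ h1, getElem_pvStep _ _ _ h2, bGather_eq_gI, hlen2]
  rw [getD_bApply c row i hi, getD_bApply c row _ (Nat.mod_lt _ (by omega)),
    bGather_eq_gI, bGather_eq_gI, gI_mod]
  -- left side: gI (bMul c) row i splits into the two index sums
  have hgetMul : ∀ r, r < c.length → (bMul c).getD r false
      = xor (c.getD r false) (c.getD ((r + (c.length - 1)) % c.length) false) := by
    intro r hr
    unfold bMul
    exact PySem.List.getD_map_range _ _ _ _ hr
  have lhs1 : gI (bMul c) row i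
      = PySem.Int.bxor (gI c row i)
          (xlist ((List.range c.length).map
            (fun r => if c.getD ((r + (c.length - 1)) % c.length) false
              then row.getD ((i + r) % row.length) 0 else 0))) := by
    unfold gI
    rw [length_bMul]
    have hsplit : (List.range c.length).map
        (fun r => if (bMul c).getD r false then row.getD ((i + r) % row.length) 0 else 0)
      = (List.range c.length).map (fun r => PySem.Int.bxor
          (if c.getD r false then row.getD ((i + r) % row.length) 0 else 0)
          (if c.getD ((r + (c.length - 1)) % c.length) false
            then row.getD ((i + r) % row.length) 0 else 0)) := by
      apply List.map_congr_left
      intro r hr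
      rw [hgetMul r (List.mem_range.mp hr), ite_xor_split]
    rw [hsplit, xlist_map_bxor]
  rw [lhs1]
  congr 1
  -- the remaining sum is the (i+1)-sum read through the rotation by n-1
  have hrot : (List.range c.length).map
      (fun r => if c.getD ((r + (c.length - 1)) % c.length) false
        then row.getD ((i + r) % row.length) 0 else 0)
      = ((List.range c.length).map
          (fun q => if c.getD q false then row.getD ((i + 1 + q) % row.length) 0 else 0)).rotate
          (c.length - 1) := by
    apply List.ext_getElem (by simp [List.length_rotate])
    intro j hj1 hj2
    have hjn : j < c.length := by simpa using hj1
    rw [List.getElem_map, List.getElem_range, List.getElem_rotate]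
    simp only [List.length_map, List.length_range, List.getElem_map, List.getElem_range]
    have hidx : (i + 1 + (j + (c.length - 1)) % c.length) % row.length
        = (i + j) % row.length := by
      rw [hrow, Nat.add_mod_mod]
      have h3 : i + 1 + (j + (c.length - 1)) = i + j + c.length := by omega
      rw [h3, Nat.add_mod_right]
    rw [hidx]
  rw [hrot]
  rw [xlist_perm _ _ (List.rotate_perm
    ((List.range c.length).map
      (fun q => if c.getD q false then row.getD ((i + 1 + q) % row.length) 0 else 0))
    (c.length - 1))]
  rfl

-- The unit vector acts as the identity.
theorem bApply_e0 (n : Nat) (h0 : 0 < n) (row : List Int) (hrow : row.length = n) :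
    bApply ((List.replicate n false).set 0 true) row = row := by
  apply List.ext_getElem (by simp [length_bApply])
  intro i h1 h2
  have hi : i < row.length := by rwa [length_bApply] at h1
  unfold bApply
  rw [List.getElem_map, List.getElem_range, bGather_eq_gI]
  have he : (List.replicate n false).set 0 true
      = (List.replicate n false).set 0 (!((List.replicate n false).getD 0 false)) := by
    have : (List.replicate n false).getD 0 false = false := by
      simp [List.getD]
    rw [this]
    rfl
  rw [he, gI_toggle _ row i 0 (by simp [h0]), gI_all_false, PySem.Int.bxor_zero]
  rw [Nat.add_zero, hrow]
  have : i % n = i := Nat.mod_eq_of_lt (by omega)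
  rw [this]
  exact (List.getD_eq_getElem row 0 hi)

-- One step of Source B's bit loop in canonical form.
theorem bBody_eq (k J : Nat) (c : List Bool) :
    bBody ((k : Nat) : Int) c ((J : Nat) : Int)
      = if k / 2 ^ J % 2 = 1 then bMul (bSquare c) else bSquare c := by
  unfold bBody
  rw [Int.toNat_natCast, pvBit_test']
  by_cases hbit : k / 2 ^ J % 2 = 1
  · simp [hbit]
  · simp [hbit]

-- B's bit loop: starting from a vector acting as (pvStep 1)^[t], after processing the bits
-- J-1 … 0 of k the vector acts as (pvStep 1)^[t·2^J + k mod 2^J].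
theorem bLoop (k n : Nat) (h0 : 0 < n) : ∀ (J : Nat) (c : List Bool) (t : Nat),
    c.length = n →
    (∀ row : List Int, row.length = n → bApply c row = (pvStep 1)^[t] row) →
    ((PySem.List.pyRange ((J : Int) - 1) (-1) (-1)).foldl (bBody ((k : Nat) : Int)) c).length = n
    ∧ ∀ row : List Int, row.length = n →
        bApply ((PySem.List.pyRange ((J : Int) - 1) (-1) (-1)).foldl (bBody ((k : Nat) : Int)) c) row
          = (pvStep 1)^[t * 2 ^ J + k % 2 ^ J] row := by
  intro J
  induction J with
  | zero =>
      intro c t hc hinv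
      rw [show ((0 : Nat) : Int) - 1 = -1 by norm_num, PySem.List.pyRange_neg_one_eq_nil (by norm_num)]
      simp only [List.foldl_nil]
      exact ⟨hc, fun row hrow => by rw [hinv row hrow, pow_zero, Nat.mul_one, Nat.mod_one, Nat.add_zero]⟩
  | succ J ih =>
      intro c t hc hinv
      have hJ : ((J + 1 : Nat) : Int) - 1 = (J : Int) := by push_cast; ring
      rw [hJ, PySem.List.pyRange_neg_one_cons (by omega), List.foldl_cons, bBody_eq k J c]
      have hc2 : (bSquare c).length = n := by rw [length_bSquare, hc]
      have hinv2 : ∀ row : List Int, row.length = n →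
          bApply (bSquare c) row = (pvStep 1)^[t + t] row := by
        intro row hrow
        rw [bApply_bSquare c row (by omega) (by omega),
          hinv row hrow, hinv _ (by rw [length_pvStep_iter, hrow])]
        rw [← Function.iterate_add_apply]
      have hmod : k % 2 ^ (J + 1) = k % 2 ^ J + 2 ^ J * (k / 2 ^ J % 2) := Nat.mod_pow_succ
      by_cases hbit : k / 2 ^ J % 2 = 1
      · rw [if_pos hbit]
        have hinv3 : ∀ row : List Int, row.length = n →
            bApply (bMul (bSquare c)) row = (pvStep 1)^[t + t + 1] row := by
          intro row hrow
          rw [bApply_bMul (bSquare c) row (by omega) (by omega), hinv2 row hrow,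
            ← Function.iterate_succ_apply' (pvStep 1)]
        have := ih (bMul (bSquare c)) (t + t + 1) (by rw [length_bMul, hc2]) hinv3
        refine ⟨this.1, fun row hrow => ?_⟩
        rw [this.2 row hrow]
        congr 1
        have h2 : 2 ^ (J + 1) = 2 ^ J * 2 := pow_succ 2 J
        rw [hmod, hbit, h2]; ring
      · rw [if_neg hbit]
        have := ih (bSquare c) (t + t) hc2 hinv2
        refine ⟨this.1, fun row hrow => ?_⟩
        rw [this.2 row hrow]
        congr 1
        have h0' : k / 2 ^ J % 2 = 0 := by omega
        have h2 : 2 ^ (J + 1) = 2 ^ J * 2 := pow_succ 2 J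
        rw [hmod, h0', h2]; ring

theorem B_char (m : Int) (row : List Int) (hm : 1 ≤ m) (hrow : row ≠ []) :
    xorMatrix_alt m row = (pvStep 1)^[(m - 1).toNat] row := by
  simp only [xorMatrix_alt]
  have hn : row.length ≠ 0 := by simpa using hrow
  rw [if_neg hn]
  set n := row.length with hnn
  have h0 : 0 < n := by omega
  have hk : m - 1 = (((m - 1).toNat : Nat) : Int) := by omega
  set k := (m - 1).toNat with hkk
  have hstart : ((List.replicate n false).set 0 true).length = n := by simp
  have hinv0 : ∀ r : List Int, r.length = n →
      bApply ((List.replicate n false).set 0 true) r = (pvStep 1)^[0] r := by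
    intro r hr
    rw [Function.iterate_zero_apply]
    exact bApply_e0 n h0 r hr
  have := bLoop k n h0 (PySem.Int.bitLength ((k : Nat) : Int)) ((List.replicate n false).set 0 true) 0 hstart hinv0
  rw [hk, this.2 row rfl]
  congr 1
  have hlt : k < 2 ^ PySem.Int.bitLength ((k : Nat) : Int) := by
    have := PySem.Int.lt_two_pow_bitLength ((k : Nat) : Int)
    simpa using this
  rw [Nat.zero_mul, Nat.zero_add, Nat.mod_eq_of_lt hlt]

theorem foldl_nil_fixed (f : List Int → Int → List Int) (h : ∀ j, f [] j = [])
    (l : List Int) : l.foldl f [] = [] := by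
  induction l with
  | nil => rfl
  | cons j l ih => rw [List.foldl_cons, h]; exact ih

theorem A_nil (m : Int) : xorMatrix m [] = [] := by
  exact foldl_nil_fixed _ (fun j => by split <;> rfl) _

theorem B_nil (m : Int) : xorMatrix_alt m [] = [] := rfl

-- ===== VERDICT (by name: the statement is the Claim_ definition above) =====
theorem xorMatrix_spec : Claim_equal_xorMatrix := by
  intro m row hdom hpre
  unfold Spec_xorMatrix
  rcases hpre with hm | hnil
  · rcases eq_or_ne row [] with hnil | hne
    · subst hnil
      rw [A_nil, B_nil]
    · have hub : m ≤ 2147483648 := by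
        simp only [Dom_xorMatrix, pvDomInt, Bool.and_eq_true, decide_eq_true_eq] at hdom
        exact hdom.1.2
      rw [A_char m row hm hub, B_char m row hm hne]
  · subst hnil
    rw [A_nil, B_nil]
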